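-- pv_equiv track=rewrite | github.com/zhengjian-li/data_science_group_project | dsproject/part2_ne_analysis_entity_type.py | get_ne_comparisons
-- ===== SOURCE A (Python) =====
-- def get_ne_comparisons(spacy_ne, stanza_ne):
--     """
--     Compare the named entities extracted by Spacy and Stanza
--     """
--     spacy_dict = dict()
--     stanza_dict = dict()
--
--     for ne, label in spacy_ne:
--          # If the key is not present, add it to the dictionary with an empty list as the value
--         spacy_dict.setdefault(ne, []).append(label)
--
--     for ne, label in stanza_ne:
--         # Same as above
--         stanza_dict.setdefault(ne, []).append(label)
--
--     full_agree = 0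
--     full_agree_with_type_agree = 0
--     partial_agree = 0
--     partial_agree_with_type_agree = 0
--     only_spacy = 0
--     only_stanza = 0
--
--     all_ne_predictions = spacy_dict.keys() | stanza_dict.keys()
--
--     # Compare the named entities
--     for ne in all_ne_predictions:
--         if ne in spacy_dict.keys() and ne in stanza_dict.keys():
--             full_agree += 1
--             if spacy_dict[ne] == stanza_dict[ne]:
--                 full_agree_with_type_agree += 1
--         elif ne in spacy_dict.keys():
--             partial_matches = {k: v for k, v in stanza_dict.items() if k.startswith(ne)}
--             if partial_matches:
--                 partial_agree += 1
--                 if any(spacy_dict[ne] == stanza_dict[k] for k in partial_matches.keys()):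
--                     partial_agree_with_type_agree += 1
--             else:
--                 only_spacy += 1
--         else:
--             partial_matches = {k: v for k, v in spacy_dict.items() if k.startswith(ne)}
--             if partial_matches:
--                 partial_agree += 1
--                 if any(stanza_dict[ne] == spacy_dict[k] for k in partial_matches.keys()):
--                     partial_agree_with_type_agree += 1
--             else:
--                 only_stanza += 1
--
--     stats = {
--         'Full agreement': full_agree,
--         'Full agreement with the same NE type': full_agree_with_type_agree,
--         'Partial agreement': partial_agree,
--         'Partial agreement with the same NE type': partial_agree_with_type_agree,
--         'Only predicted by Spacy': only_spacy,
--         'Only predicted by Stanza': only_stanza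
--     }
--
--     return stats
-- ===== SOURCE B (Python) =====
-- def get_ne_comparisons(spacy_ne, stanza_ne):
--     """
--     Compare the named entities extracted by Spacy and Stanza
--     (prefix-index re-implementation: one hash lookup replaces each inner scan)
--     """
--     spacy_dict = dict()
--     stanza_dict = dict()
--     for ne, label in spacy_ne:
--         spacy_dict.setdefault(ne, []).append(label)
--     for ne, label in stanza_ne:
--         stanza_dict.setdefault(ne, []).append(label)
--
--     def prefix_index(d):
--         # every prefix of a key -> list of the label-lists of the keys it prefixes
--         pairs = [(k[:i], v) for k, v in d.items() for i in range(len(k) + 1)]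
--         idx = dict()
--         for p, v in pairs:
--             idx.setdefault(p, []).append(v)
--         return idx
--
--     stanza_pref = prefix_index(stanza_dict)
--     spacy_pref = prefix_index(spacy_dict)
--
--     full = full_t = partial = partial_t = only_spacy = only_stanza = 0
--     for ne, labels in spacy_dict.items():
--         if ne in stanza_dict:
--             full += 1
--             if labels == stanza_dict[ne]:
--                 full_t += 1
--         else:
--             hits = stanza_pref.get(ne)
--             if hits:
--                 partial += 1
--                 if labels in hits:
--                     partial_t += 1
--             else:
--                 only_spacy += 1
--     for ne, labels in stanza_dict.items():
--         if ne not in spacy_dict: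
--             hits = spacy_pref.get(ne)
--             if hits:
--                 partial += 1
--                 if labels in hits:
--                     partial_t += 1
--             else:
--                 only_stanza += 1
--
--     return {
--         'Full agreement': full,
--         'Full agreement with the same NE type': full_t,
--         'Partial agreement': partial,
--         'Partial agreement with the same NE type': partial_t,
--         'Only predicted by Spacy': only_spacy,
--         'Only predicted by Stanza': only_stanza
--     }
-- ===== Notes on version B (the rewrite author's own statement) =====
-- stated objective: alternative
-- what changed: Instead of iterating a set union of the keys and scanning the whole other dict with startswith for every unmatched entity (A), B makes two passes over the two dicts and answers each partial-agreement and type-agreement test with a single lookup in a prefix index (a dict mapping every prefix of every key to the label-lists of the keys it prefixes) built once per dict.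
import Mathlib
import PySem

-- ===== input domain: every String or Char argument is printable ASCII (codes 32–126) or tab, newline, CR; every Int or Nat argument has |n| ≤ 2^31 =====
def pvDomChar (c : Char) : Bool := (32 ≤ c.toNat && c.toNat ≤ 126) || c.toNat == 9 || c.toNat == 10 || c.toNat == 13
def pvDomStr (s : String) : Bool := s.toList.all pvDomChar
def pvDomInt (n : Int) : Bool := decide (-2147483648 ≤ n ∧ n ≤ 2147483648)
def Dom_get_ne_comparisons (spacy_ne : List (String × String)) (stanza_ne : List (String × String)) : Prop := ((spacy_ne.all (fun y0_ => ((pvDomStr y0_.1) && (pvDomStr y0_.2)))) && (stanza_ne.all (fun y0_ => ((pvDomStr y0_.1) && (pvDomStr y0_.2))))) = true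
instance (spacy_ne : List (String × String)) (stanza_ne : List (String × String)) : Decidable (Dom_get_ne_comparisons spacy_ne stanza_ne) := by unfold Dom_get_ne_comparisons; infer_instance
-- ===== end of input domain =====

-- B replaces A's union-set loop with inner scans of the whole other dict for prefix matches by
-- two passes over the two dicts plus a prefix index (a dict from every prefix of a key to the
-- label-lists of the keys it prefixes), so each partial-agreement test is one dictionary lookup.

-- ===== PORT A =====
-- grouping loop shared by both Pythons verbatim: d.setdefault(ne, []).append(label)
def pvGroup (pairs : List (String × String)) : PySem.Dict String (List String) :=
  pairs.foldl (fun d p => d.modify p.1 [] (fun x => x ++ [p.2])) PySem.Dict.empty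

-- the body of A's 'for ne in all_ne_predictions' loop (state = the six counters)
def pvStepA (sp st : PySem.Dict String (List String))
    (s : Int × Int × Int × Int × Int × Int) (ne : String) : Int × Int × Int × Int × Int × Int :=
  match s with
  | (fa, fat, pa, pat, osp, ost) =>
    if sp.contains ne && st.contains ne then
      (fa + 1, if sp.getD ne [] = st.getD ne [] then fat + 1 else fat, pa, pat, osp, ost)
    else if sp.contains ne then
      let pm := st.items.filter (fun kv => PySem.Str.startswith kv.1 ne)
      if pm ≠ [] then
        (fa, fat, pa + 1,
         if pm.any (fun kv => sp.getD ne [] == st.getD kv.1 []) then pat + 1 else pat, osp, ost)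
      else (fa, fat, pa, pat, osp + 1, ost)
    else
      let pm := sp.items.filter (fun kv => PySem.Str.startswith kv.1 ne)
      if pm ≠ [] then
        (fa, fat, pa + 1,
         if pm.any (fun kv => st.getD ne [] == sp.getD kv.1 []) then pat + 1 else pat, osp, ost)
      else (fa, fat, pa, pat, osp, ost + 1)

def get_ne_comparisons (spacy_ne : List (String × String)) (stanza_ne : List (String × String)) : List (String × Int) :=
  let spacy_dict := pvGroup spacy_ne
  let stanza_dict := pvGroup stanza_ne
  let all_ne := PySem.Set.union (PySem.Set.ofList spacy_dict.keys) stanza_dict.keys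
  let s := all_ne.foldl (pvStepA spacy_dict stanza_dict) (0, 0, 0, 0, 0, 0)
  [("Full agreement", s.1), ("Full agreement with the same NE type", s.2.1),
   ("Partial agreement", s.2.2.1), ("Partial agreement with the same NE type", s.2.2.2.1),
   ("Only predicted by Spacy", s.2.2.2.2.1), ("Only predicted by Stanza", s.2.2.2.2.2)]

-- ===== PORT B =====
-- prefix_index(d): [(k[:i], v) for k, v in d.items() for i in range(len(k)+1)], grouped
def pvPrefixIndex (d : PySem.Dict String (List String)) : PySem.Dict String (List (List String)) :=
  let pairs := d.items.flatMap (fun kv =>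
    (PySem.List.pyRange 0 (PySem.Str.len kv.1 + 1) 1).map
      (fun i => (PySem.Str.slice kv.1 none (some i), kv.2)))
  pairs.foldl (fun d p => d.modify p.1 [] (fun x => x ++ [p.2])) PySem.Dict.empty

-- the body of B's first loop (over spacy_dict.items())
def pvStepB1 (std : PySem.Dict String (List String)) (pref : PySem.Dict String (List (List String)))
    (s : Int × Int × Int × Int × Int × Int) (kv : String × List String) : Int × Int × Int × Int × Int × Int :=
  match s with
  | (fa, fat, pa, pat, osp, ost) =>
    if std.contains kv.1 then
      (fa + 1, if kv.2 = std.getD kv.1 [] then fat + 1 else fat, pa, pat, osp, ost)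
    else
      let hits := pref.getD kv.1 []
      if hits ≠ [] then
        (fa, fat, pa + 1, if hits.contains kv.2 then pat + 1 else pat, osp, ost)
      else (fa, fat, pa, pat, osp + 1, ost)

-- the body of B's second loop (over stanza_dict.items())
def pvStepB2 (spd : PySem.Dict String (List String)) (pref : PySem.Dict String (List (List String)))
    (s : Int × Int × Int × Int × Int × Int) (kv : String × List String) : Int × Int × Int × Int × Int × Int :=
  match s with
  | (fa, fat, pa, pat, osp, ost) =>
    if !spd.contains kv.1 then
      let hits := pref.getD kv.1 []
      if hits ≠ [] then
        (fa, fat, pa + 1, if hits.contains kv.2 then pat + 1 else pat, osp, ost)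
      else (fa, fat, pa, pat, osp, ost + 1)
    else (fa, fat, pa, pat, osp, ost)

def get_ne_comparisons_alt (spacy_ne : List (String × String)) (stanza_ne : List (String × String)) : List (String × Int) :=
  let spacy_dict := pvGroup spacy_ne
  let stanza_dict := pvGroup stanza_ne
  let stanza_pref := pvPrefixIndex stanza_dict
  let spacy_pref := pvPrefixIndex spacy_dict
  let s1 := spacy_dict.items.foldl (pvStepB1 stanza_dict stanza_pref) (0, 0, 0, 0, 0, 0)
  let s := stanza_dict.items.foldl (pvStepB2 spacy_dict spacy_pref) s1
  [("Full agreement", s.1), ("Full agreement with the same NE type", s.2.1),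
   ("Partial agreement", s.2.2.1), ("Partial agreement with the same NE type", s.2.2.2.1),
   ("Only predicted by Spacy", s.2.2.2.2.1), ("Only predicted by Stanza", s.2.2.2.2.2)]

-- ===== PRECONDITION & SPEC =====
def Spec_get_ne_comparisons (spacy_ne : List (String × String)) (stanza_ne : List (String × String)) (out : List (String × Int)) : Prop := out = get_ne_comparisons_alt spacy_ne stanza_ne
instance (spacy_ne : List (String × String)) (stanza_ne : List (String × String)) (out : List (String × Int)) : Decidable (Spec_get_ne_comparisons spacy_ne stanza_ne out) := by unfold Spec_get_ne_comparisons; infer_instance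

-- ===== CLAIM (what is proved, stated in full; the proofs are below) =====
def Claim_equal_get_ne_comparisons : Prop := ∀ (spacy_ne : List (String × String)) (stanza_ne : List (String × String)), Dom_get_ne_comparisons spacy_ne stanza_ne → Spec_get_ne_comparisons spacy_ne stanza_ne (get_ne_comparisons spacy_ne stanza_ne)

-- ===== LEMMAS AND PROOFS =====

-- the keys of a grouped dict are distinct
theorem pvGroup_nodup (pairs : List (String × String)) : (pvGroup pairs).keys.Nodup :=
  PySem.Dict.nodup_keys_foldl_modify_key pairs Prod.fst [] (fun _ p => (fun x => x ++ [p.2]))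
    PySem.Dict.empty PySem.Dict.nodup_keys_empty

-- folding Set.add over a duplicate-free list appends exactly the new elements, in order
theorem pv_foldl_add (t : List String) (s : List String) (ht : t.Nodup) :
    List.foldl PySem.Set.add s t = s ++ t.filter (fun x => !decide (x ∈ s)) := by
  induction t generalizing s with
  | nil => simp
  | cons x t ih =>
    rcases List.nodup_cons.mp ht with ⟨hx, ht'⟩
    simp only [List.foldl_cons, List.filter_cons]
    by_cases hm : x ∈ s
    · have : PySem.Set.add s x = s := by
        simp [PySem.Set.add, PySem.Set.contains, hm]
      rw [this, ih s ht']
      simp [hm]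
    · have : PySem.Set.add s x = s ++ [x] := by
        simp [PySem.Set.add, PySem.Set.contains, hm]
      rw [this, ih _ ht']
      have hf : t.filter (fun y => !decide (y ∈ s ++ [x])) = t.filter (fun y => !decide (y ∈ s)) := by
        apply List.filter_congr
        intro y hy
        have : y ≠ x := fun h => hx (h ▸ hy)
        simp [List.mem_append, this]
      rw [hf]
      simp [hm, List.append_assoc]

-- a guarded fold is a fold over the filtered list
theorem pv_foldl_guard {α β : Type} (p : α → Bool) (f : β → α → β)
    (h : ∀ s x, p x = false → f s x = s) :
    ∀ (l : List α) (init : β), l.foldl f init = (l.filter p).foldl f init := by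
  intro l
  induction l with
  | nil => intro init; rfl
  | cons x t ih =>
    intro init
    by_cases hp : p x
    · simp [hp, ih]
    · simp only [Bool.not_eq_true] at hp
      simp [hp, h init x hp, ih]

-- some slice k[:i] with 0 ≤ i ≤ len(k) equals ne exactly when ne is a prefix of k
theorem pv_slice_eq_iff (k ne : String) :
    (∃ i, i ∈ PySem.List.pyRange 0 (PySem.Str.len k + 1) 1 ∧ PySem.Str.slice k none (some i) = ne)
      ↔ PySem.Str.startswith k ne = true := by
  rw [show PySem.Str.startswith k ne = PySem.Chars.startswith k.toList ne.toList from by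
        simp [PySem.Str.startswith_eq]]
  rw [PySem.Chars.startswith_iff]
  constructor
  · rintro ⟨i, hi, hslice⟩
    rcases (PySem.List.mem_pyRange_one).mp hi with ⟨h0, _⟩
    have : ne.toList = List.take i.toNat k.toList := by
      rw [← hslice]
      simp [PySem.Str.toList_slice, PySem.Chars.slice_eq_listSlice, PySem.List.slice_to _ h0]
    rw [this]
    exact List.take_prefix _ _
  · intro hpre
    refine ⟨(ne.toList.length : Int), ?_, ?_⟩
    · rw [PySem.List.mem_pyRange_one]
      have := hpre.length_le
      have hlen : PySem.Str.len k = (k.toList.length : Int) := by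
        simp [PySem.Str.len_eq]
      constructor
      · positivity
      · rw [hlen]; exact_mod_cast Nat.lt_succ_of_le this
    · apply String.toList_inj.mp
      rw [PySem.Str.toList_slice, PySem.Chars.slice_eq_listSlice,
          PySem.List.slice_to _ (by positivity)]
      rw [Int.toNat_natCast]
      exact (List.prefix_iff_eq_take.mp hpre).symm

-- what the prefix index stores under ne: the label-lists of exactly the keys ne prefixes
theorem pv_mem_prefixIndex (d : PySem.Dict String (List String)) (ne : String) (L : List String) :
    L ∈ (pvPrefixIndex d).getD ne [] ↔
      ∃ kv ∈ d.items, PySem.Str.startswith kv.1 ne = true ∧ kv.2 = L := by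
  unfold pvPrefixIndex
  rw [PySem.Dict.getD_foldl_modify_append]
  simp only [PySem.Dict.getD_empty, List.nil_append, List.mem_map, List.mem_filter,
    List.mem_flatMap, beq_iff_eq]
  constructor
  · rintro ⟨p, ⟨⟨kv, hkv, i, hi, hip⟩, hne⟩, hL⟩
    refine ⟨kv, hkv, ?_, ?_⟩
    · exact (pv_slice_eq_iff kv.1 ne).mp ⟨i, hi, by rw [← hne, ← hip]⟩
    · rw [← hL, ← hip]
  · rintro ⟨kv, hkv, hsw, hv⟩
    rcases (pv_slice_eq_iff kv.1 ne).mpr hsw with ⟨i, hi, hslice⟩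
    exact ⟨(ne, kv.2), ⟨⟨kv, hkv, i, hi, by rw [hslice]⟩, rfl⟩, hv⟩

theorem pv_prefixIndex_ne_nil (d : PySem.Dict String (List String)) (ne : String) :
    (pvPrefixIndex d).getD ne [] ≠ [] ↔
      ∃ kv ∈ d.items, PySem.Str.startswith kv.1 ne = true := by
  rw [← List.isEmpty_eq_false_iff, List.isEmpty_eq_false_iff_exists_mem]
  constructor
  · rintro ⟨L, hL⟩
    rcases (pv_mem_prefixIndex d ne L).mp hL with ⟨kv, hkv, hsw, _⟩
    exact ⟨kv, hkv, hsw⟩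
  · rintro ⟨kv, hkv, hsw⟩
    exact ⟨kv.2, (pv_mem_prefixIndex d ne kv.2).mpr ⟨kv, hkv, hsw, rfl⟩⟩

-- A's partial-agreement test over the items of d, rephrased through the prefix index
theorem pv_partial_eq (d : PySem.Dict String (List String)) (hd : d.keys.Nodup) (ne : String) (L : List String) :
    (d.items.filter (fun kv => PySem.Str.startswith kv.1 ne) ≠ []
        ↔ (pvPrefixIndex d).getD ne [] ≠ [])
    ∧ ((d.items.filter (fun kv => PySem.Str.startswith kv.1 ne)).any
          (fun kv => L == d.getD kv.1 [])
        = ((pvPrefixIndex d).getD ne []).contains L) := by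
  constructor
  · rw [pv_prefixIndex_ne_nil, Ne, List.filter_eq_nil_iff]
    push Not
    simp
  · rw [Bool.eq_iff_iff, List.any_eq_true, List.contains_iff_mem]
    rw [pv_mem_prefixIndex]
    constructor
    · rintro ⟨kv, hkv, hbeq⟩
      rcases List.mem_filter.mp hkv with ⟨hmem, hsw⟩
      refine ⟨kv, hmem, hsw, ?_⟩
      have := PySem.Dict.getD_of_mem_items d (k := kv.1) (v := kv.2) ?hm hd []
      · rw [← this]; exact (beq_iff_eq.mp hbeq).symm
      · exact hmem
    · rintro ⟨kv, hmem, hsw, hv⟩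
      refine ⟨kv, List.mem_filter.mpr ⟨hmem, hsw⟩, ?_⟩
      have := PySem.Dict.getD_of_mem_items d (k := kv.1) (v := kv.2) hmem hd []
      rw [this, beq_iff_eq, hv]

theorem pv_stepA_eq_B1 (sp st : PySem.Dict String (List String))
    (hst : st.keys.Nodup) {ne : String} (hne : ne ∈ sp.keys)
    (s : Int × Int × Int × Int × Int × Int) :
    pvStepA sp st s ne = pvStepB1 st (pvPrefixIndex st) s (ne, sp.getD ne []) := by
  obtain ⟨fa, fat, pa, pat, osp, ost⟩ := s
  have hc : sp.contains ne = true := (PySem.Dict.contains_iff_mem_keys sp ne).mpr hne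
  rcases pv_partial_eq st hst ne (sp.getD ne []) with ⟨hiff, hany⟩
  by_cases hcs : st.contains ne = true
  · simp [pvStepA, pvStepB1, hc, hcs]
  · simp only [Bool.not_eq_true] at hcs
    simp only [pvStepA, pvStepB1, hc, hcs, Bool.true_and]
    by_cases hpm : st.items.filter (fun kv => PySem.Str.startswith kv.1 ne) ≠ []
    · rw [if_pos hpm, if_pos (hiff.mp hpm), hany]
      simp
    · rw [if_neg hpm, if_neg (fun h => hpm (hiff.mpr h))]
      simp

theorem pv_stepA_eq_B2 (sp st : PySem.Dict String (List String))
    (hsp : sp.keys.Nodup) {ne : String} (_hne : ne ∈ st.keys) (hnsp : ne ∉ sp.keys)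
    (s : Int × Int × Int × Int × Int × Int) :
    pvStepA sp st s ne = pvStepB2 sp (pvPrefixIndex sp) s (ne, st.getD ne []) := by
  obtain ⟨fa, fat, pa, pat, osp, ost⟩ := s
  have hc : sp.contains ne = false := by
    rw [← Bool.not_eq_true]
    exact fun h => hnsp ((PySem.Dict.contains_iff_mem_keys sp ne).mp h)
  rcases pv_partial_eq sp hsp ne (st.getD ne []) with ⟨hiff, hany⟩
  simp only [pvStepA, pvStepB2, hc, Bool.false_and, Bool.not_false]
  by_cases hpm : sp.items.filter (fun kv => PySem.Str.startswith kv.1 ne) ≠ []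
  · rw [if_pos hpm, if_pos (hiff.mp hpm), hany]
    simp
  · rw [if_neg hpm, if_neg (fun h => hpm (hiff.mpr h))]
    simp

-- the two fold results agree
theorem pv_fold_eq (spacy_ne stanza_ne : List (String × String)) :
    (PySem.Set.union (PySem.Set.ofList (pvGroup spacy_ne).keys) (pvGroup stanza_ne).keys).foldl
        (pvStepA (pvGroup spacy_ne) (pvGroup stanza_ne)) (0, 0, 0, 0, 0, 0)
    = (pvGroup stanza_ne).items.foldl (pvStepB2 (pvGroup spacy_ne) (pvPrefixIndex (pvGroup spacy_ne)))
        ((pvGroup spacy_ne).items.foldl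
          (pvStepB1 (pvGroup stanza_ne) (pvPrefixIndex (pvGroup stanza_ne))) (0, 0, 0, 0, 0, 0)) := by
  have hspN : (pvGroup spacy_ne).keys.Nodup := pvGroup_nodup _
  have hstN : (pvGroup stanza_ne).keys.Nodup := pvGroup_nodup _
  set sp := pvGroup spacy_ne
  set st := pvGroup stanza_ne
  have h1 : sp.items.foldl (pvStepB1 st (pvPrefixIndex st)) (0, 0, 0, 0, 0, 0)
      = sp.keys.foldl (pvStepA sp st) (0, 0, 0, 0, 0, 0) := by
    rw [PySem.Dict.items_eq_map_keys sp hspN [], List.foldl_map]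
    exact PySem.List.foldl_congr_mem sp.keys
      (fun acc k => pvStepB1 st (pvPrefixIndex st) acc (k, sp.getD k [])) (pvStepA sp st) _
      (fun acc k hk => (pv_stepA_eq_B1 sp st hstN hk acc).symm)
  have h2 : ∀ init, st.items.foldl (pvStepB2 sp (pvPrefixIndex sp)) init
      = (st.keys.filter (fun x => !decide (x ∈ sp.keys))).foldl (pvStepA sp st) init := by
    intro init
    rw [pv_foldl_guard (fun kv => !sp.contains kv.1) _
      (fun s kv h => by obtain ⟨fa, fat, pa, pat, osp, ost⟩ := s; simp [pvStepB2, h]) st.items init]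
    rw [PySem.Dict.items_eq_map_keys st hstN [], List.filter_map, List.foldl_map]
    have hpred : ((fun kv : String × List String => !sp.contains kv.1)
        ∘ (fun k => (k, st.getD k []))) = (fun x => !decide (x ∈ sp.keys)) := by
      funext k
      simp [Function.comp, PySem.Dict.contains_eq_decide_mem_keys]
    rw [hpred]
    refine PySem.List.foldl_congr_mem _ _ (pvStepA sp st) _ (fun acc k hk => ?_)
    rcases List.mem_filter.mp hk with ⟨hk1, hk2⟩
    have hk2' : k ∉ sp.keys := by simpa using hk2
    exact (pv_stepA_eq_B2 sp st hspN hk1 hk2' acc).symm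
  have hu : PySem.Set.union (PySem.Set.ofList sp.keys) st.keys
      = sp.keys ++ st.keys.filter (fun x => !decide (x ∈ sp.keys)) := by
    rw [PySem.Set.ofList_eq_self_of_nodup _ hspN]
    exact pv_foldl_add st.keys sp.keys hstN
  rw [hu, List.foldl_append, h1, h2]

-- ===== VERDICT (by name: the statement is the Claim_ definition above) =====
theorem get_ne_comparisons_spec : Claim_equal_get_ne_comparisons := by
  intro spacy_ne stanza_ne _
  unfold Spec_get_ne_comparisons
  exact congrArg (fun s : Int × Int × Int × Int × Int × Int =>
    [("Full agreement", s.1), ("Full agreement with the same NE type", s.2.1),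
     ("Partial agreement", s.2.2.1), ("Partial agreement with the same NE type", s.2.2.2.1),
     ("Only predicted by Spacy", s.2.2.2.2.1), ("Only predicted by Stanza", s.2.2.2.2.2)])
    (pv_fold_eq spacy_ne stanza_ne)
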